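-- pv_equiv track=rewrite | github.com/JosepBC/lalligueta_ranking_plugin | __init__.py | group_by_heat
-- ===== SOURCE A (Python) =====
-- def group_by_heat(leaderboard):
--     """
--     Groups the leaderboard by heat and transforms it into a list of lists.
--
--     Args:
--         leaderboard (list): The leaderboard to group.
--
--     Returns:
--         list: A list of lists of grouped leaderboard entries.
--     """
--     grouped = {}
--
--     # Group the leaderboard by heat
--     for entry in leaderboard:
--         heat_name = entry['heat']
--         if heat_name not in grouped:
--             grouped[heat_name] = []
--         grouped[heat_name].append(entry)
--
--     # Convert grouped dictionary to a list of lists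
--     result = list(grouped.values())
--
--     return result
-- ===== SOURCE B (Python) =====
-- def group_by_heat(leaderboard):
--     """Group leaderboard entries by heat (first-appearance order) into a list of lists."""
--     heats = list(dict.fromkeys(entry['heat'] for entry in leaderboard))
--     return [[entry for entry in leaderboard if entry['heat'] == heat] for heat in heats]
-- ===== Notes on version B (the rewrite author's own statement) =====
-- stated objective: simpler
-- what changed: Replaces the single accumulating dict-building pass with an ordered dedup of the heat names followed by one filtering comprehension per heat; no mutable dict of lists is maintained.
import Mathlib
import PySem

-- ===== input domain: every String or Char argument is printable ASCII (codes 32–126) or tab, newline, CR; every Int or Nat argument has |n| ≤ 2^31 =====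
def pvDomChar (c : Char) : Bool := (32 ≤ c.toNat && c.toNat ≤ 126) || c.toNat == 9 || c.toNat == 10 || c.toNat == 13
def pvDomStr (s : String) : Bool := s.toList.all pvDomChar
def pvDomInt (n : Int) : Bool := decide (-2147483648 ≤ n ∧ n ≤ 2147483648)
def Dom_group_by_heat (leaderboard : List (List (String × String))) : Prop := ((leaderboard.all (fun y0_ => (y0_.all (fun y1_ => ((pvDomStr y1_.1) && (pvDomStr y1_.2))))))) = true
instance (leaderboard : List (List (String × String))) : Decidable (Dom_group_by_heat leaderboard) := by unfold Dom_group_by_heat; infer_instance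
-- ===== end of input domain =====

-- B groups by an ordered dedup of the heat names followed by one filter per heat,
-- instead of A's single accumulating pass over a dict of lists (objective: simpler).

-- ===== PORT A =====
-- shared helper: entry['heat'] in total form (Pre_ guarantees the key is present)
def pvHeat (e : List (String × String)) : String := (PySem.Dict.mk e).getD "heat" ""

-- the body of A's grouping loop, one entry at a time
def pvStepA (g : PySem.Dict String (List (List (String × String)))) (entry : List (String × String)) : PySem.Dict String (List (List (String × String))) :=
  let heat_name := pvHeat entry
  let g' := if g.contains heat_name then g else g.insert heat_name []
  g'.modify heat_name [] (fun v => v ++ [entry])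

def group_by_heat (leaderboard : List (List (String × String))) : List (List (List (String × String))) :=
  (leaderboard.foldl pvStepA (PySem.Dict.mk [])).values

-- ===== PORT B =====
def group_by_heat_alt (leaderboard : List (List (String × String))) : List (List (List (String × String))) :=
  (PySem.List.dedup (leaderboard.map pvHeat)).map
    (fun h => leaderboard.filter (fun e => pvHeat e == h))

-- ===== PRECONDITION & SPEC =====
-- Pre_: every entry has a 'heat' key; on an entry without one Python raises KeyError (in A and in B alike).
def Pre_group_by_heat (leaderboard : List (List (String × String))) : Prop :=
  ∀ e ∈ leaderboard, e.any (fun p => p.1 == "heat") = true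

instance (leaderboard : List (List (String × String))) : Decidable (Pre_group_by_heat leaderboard) := by unfold Pre_group_by_heat; infer_instance

def pvWitness_group_by_heat : (List (List (String × String))) :=
  [[("heat", "A"), ("name", "x")], [("heat", "B"), ("name", "y")], [("heat", "A"), ("name", "z")]]

def Spec_group_by_heat (leaderboard : List (List (String × String))) (out : List (List (List (String × String)))) : Prop := out = group_by_heat_alt leaderboard
instance (leaderboard : List (List (String × String))) (out : List (List (List (String × String)))) : Decidable (Spec_group_by_heat leaderboard out) := by unfold Spec_group_by_heat; infer_instance

-- ===== CLAIM (what is proved, stated in full; the proofs are below) =====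
def Claim_equal_group_by_heat : Prop := ∀ (leaderboard : List (List (String × String))), Dom_group_by_heat leaderboard → Pre_group_by_heat leaderboard → Spec_group_by_heat leaderboard (group_by_heat leaderboard)

-- ===== LEMMAS AND PROOFS =====

-- the association list A's dict holds after processing the prefix `l`
def pvModel (l : List (List (String × String))) : List (String × List (List (String × String))) :=
  (PySem.List.dedup (l.map pvHeat)).map (fun h => (h, l.filter (fun e => pvHeat e == h)))

theorem pvStepA_mem (M : List (String × List (List (String × String)))) (e : List (String × String))
    (hb : (M.any (fun p => p.1 == pvHeat e)) = true) :
    pvStepA (PySem.Dict.mk M) e =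
      PySem.Dict.mk (M.map (fun p => if p.1 == pvHeat e then
        (pvHeat e, ((M.find? (fun q => q.1 == pvHeat e)).map Prod.snd).getD [] ++ [e]) else p)) := by
  simp [pvStepA, PySem.Dict.contains, PySem.Dict.modify, PySem.Dict.getD, PySem.Dict.get?,
    PySem.Dict.insert, hb, Option.map]

theorem pvStepA_notmem (M : List (String × List (List (String × String)))) (e : List (String × String))
    (hb : (M.any (fun p => p.1 == pvHeat e)) = false) :
    pvStepA (PySem.Dict.mk M) e = PySem.Dict.mk (M ++ [(pvHeat e, [e])]) := by
  have hfn : M.find? (fun q => q.1 == pvHeat e) = none := by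
    rw [List.find?_eq_none]
    intro p hp
    simpa using List.any_eq_false.mp hb p hp
  simp only [pvStepA, PySem.Dict.contains, PySem.Dict.modify, PySem.Dict.getD, PySem.Dict.get?,
    PySem.Dict.insert, hb]
  simp [List.find?_append, hfn]
  conv_rhs => rw [← List.map_id M]
  apply List.map_congr_left
  intro p hp
  have h1 : ¬ p.1 = pvHeat e := by simpa using List.any_eq_false.mp hb p hp
  simp [h1]

theorem pvFind_map_key {α : Type} (D : List String) (f : String → α) (h : String) (hc : h ∈ D) :
    (D.map (fun h' => (h', f h'))).find? (fun p => p.1 == h) = some (h, f h) := by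
  induction D with
  | nil => cases hc
  | cons a D ih =>
      rw [List.map_cons]
      by_cases ha : a = h
      · subst ha
        rw [List.find?_cons_of_pos (by simp)]
      · rw [List.find?_cons_of_neg (by simp [ha])]
        exact ih (by cases hc with | head => exact absurd rfl ha | tail _ m => exact m)

theorem pvDedup_append (l : List String) (x : String) :
    PySem.List.dedup (l ++ [x]) =
      if x ∈ PySem.List.dedup l then PySem.List.dedup l else PySem.List.dedup l ++ [x] := by
  simp only [PySem.List.dedup, PySem.Set.ofList, List.foldl_append, List.foldl_cons, List.foldl_nil]
  show (PySem.Set.ofList l).add x = _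
  simp only [PySem.Set.add, PySem.Set.contains, List.contains_eq_mem, PySem.Set.ofList]
  split_ifs with h1 h2 h2 <;> simp_all

theorem pvModel_any (pre : List (List (String × String))) (e : List (String × String)) :
    (pvModel pre).any (fun p => p.1 == pvHeat e)
      = decide (pvHeat e ∈ pre.map pvHeat) := by
  rw [pvModel, List.any_map]
  simp only [Function.comp_def]
  by_cases hx : pvHeat e ∈ pre.map pvHeat
  · have hx' : pvHeat e ∈ PySem.List.dedup (pre.map pvHeat) := (PySem.Set.mem_ofList _ _).mpr hx
    simp only [hx, decide_true, List.any_eq_true]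
    exact ⟨pvHeat e, hx', by simp⟩
  · have hx' : pvHeat e ∉ PySem.List.dedup (pre.map pvHeat) :=
      fun m => hx ((PySem.Set.mem_ofList _ _).mp m)
    simp only [hx, decide_false, List.any_eq_false]
    intro a ha
    simp only [beq_iff_eq]
    exact fun hEq => hx' (hEq ▸ ha)

theorem pvStepA_model (pre : List (List (String × String))) (e : List (String × String)) :
    pvStepA (PySem.Dict.mk (pvModel pre)) e = PySem.Dict.mk (pvModel (pre ++ [e])) := by
  by_cases hx : pvHeat e ∈ pre.map pvHeat
  · have hx' : pvHeat e ∈ PySem.List.dedup (pre.map pvHeat) := (PySem.Set.mem_ofList _ _).mpr hx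
    rw [pvStepA_mem _ _ (by rw [pvModel_any]; simp [hx])]
    congr 1
    simp only [pvModel, List.map_append, List.map_cons, List.map_nil]
    rw [pvDedup_append, if_pos (by simpa using hx'), List.map_map]
    rw [pvFind_map_key _ _ _ hx']
    apply List.map_congr_left
    intro h' _
    simp only [Function.comp_def]
    by_cases he : h' = pvHeat e
    · subst he
      simp [List.filter_append]
    · have he' : ¬ pvHeat e = h' := fun hEq => he hEq.symm
      simp [he, he', List.filter_append]
  · have hx' : pvHeat e ∉ PySem.List.dedup (pre.map pvHeat) :=
      fun m => hx ((PySem.Set.mem_ofList _ _).mp m)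
    rw [pvStepA_notmem _ _ (by rw [pvModel_any]; simp [hx])]
    congr 1
    simp only [pvModel, List.map_append, List.map_cons, List.map_nil]
    rw [pvDedup_append, if_neg (by simpa using hx'), List.map_append]
    congr 1
    · apply List.map_congr_left
      intro h' hm
      have he : ¬ pvHeat e = h' := fun hEq => hx' (hEq ▸ hm)
      simp [List.filter_append, he]
    · simp only [List.map_cons, List.map_nil, List.filter_append]
      have : pre.filter (fun x => pvHeat x == pvHeat e) = [] := by
        rw [List.filter_eq_nil_iff]
        intro a ha
        simp only [beq_iff_eq]
        exact fun hEq => hx (hEq ▸ List.mem_map_of_mem ha)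
      simp [this]

theorem pvFold_model (xs pre : List (List (String × String))) :
    xs.foldl pvStepA (PySem.Dict.mk (pvModel pre)) = PySem.Dict.mk (pvModel (pre ++ xs)) := by
  induction xs generalizing pre with
  | nil => simp
  | cons x xs ih =>
      simp only [List.foldl_cons, pvStepA_model]
      rw [ih (pre ++ [x])]
      simp

-- ===== VERDICT (by name: the statement is the Claim_ definition above) =====
theorem group_by_heat_spec : Claim_equal_group_by_heat := by
  intro lb _ _
  show _ = _
  have h0 : (PySem.Dict.mk ([] : List (String × List (List (String × String))))) = PySem.Dict.mk (pvModel []) := by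
    simp [pvModel, PySem.List.dedup, PySem.Set.ofList]
  rw [group_by_heat, h0, pvFold_model lb []]
  simp [PySem.Dict.values, pvModel, group_by_heat_alt]
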